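-- pv_equiv track=rewrite | github.com/hyeon-marina/coding-test-preparation | Python/백준/Silver/4948. 베르트랑 공준/베르트랑 공준.py | sieve_prefix
-- ===== SOURCE A (Python) =====
-- def sieve_prefix(limit: int):
--     is_prime = [True] * (limit + 1)
--     if limit >= 0: is_prime[0] = False
--     if limit >= 1: is_prime[1] = False
--
--     p = 2
--     while p * p <= limit:
--         if is_prime[p]:
--             step = p
--             start = p * p
--             for x in range(start, limit + 1, step):
--                 is_prime[x] = False
--         p += 1
--
--     prefix = [0] * (limit + 1)
--     cnt = 0
--     for i in range(limit + 1):
--         if is_prime[i]: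
--             cnt += 1
--         prefix[i] = cnt
--     return prefix
-- ===== SOURCE B (Python) =====
-- def _is_prime(i):
--     if i < 2:
--         return False
--     d = 2
--     while d * d <= i:
--         if i % d == 0:
--             return False
--         d += 1
--     return True
--
--
-- def sieve_prefix(limit: int):
--     prefix = []
--     cnt = 0
--     for i in range(limit + 1):
--         if _is_prime(i):
--             cnt += 1
--         prefix.append(cnt)
--     return prefix
-- ===== Notes on version B (the rewrite author's own statement) =====
-- stated objective: simpler
-- what changed: Replaces the Sieve of Eratosthenes over a mutable boolean array plus a separate prefix-sum pass over a preallocated array with a single pass that trial-divides each number up to its square root and appends the running prime count.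
import Mathlib
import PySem

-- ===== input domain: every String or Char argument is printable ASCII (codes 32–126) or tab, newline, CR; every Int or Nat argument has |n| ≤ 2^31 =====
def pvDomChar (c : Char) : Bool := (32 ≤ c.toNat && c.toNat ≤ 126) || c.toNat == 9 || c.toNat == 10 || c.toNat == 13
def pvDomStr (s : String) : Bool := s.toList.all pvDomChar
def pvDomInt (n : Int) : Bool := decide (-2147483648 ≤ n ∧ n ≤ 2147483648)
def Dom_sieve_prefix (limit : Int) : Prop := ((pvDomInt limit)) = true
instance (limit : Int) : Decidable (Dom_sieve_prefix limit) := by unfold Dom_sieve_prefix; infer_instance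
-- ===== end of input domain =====

-- B replaces A's Sieve of Eratosthenes + separate prefix-sum pass by one pass that
-- trial-divides each number and appends the running prime count (objective: simpler).

-- ===== PORT A =====
-- A's while-loop: p advances while p*p <= limit; when is_prime[p], the inner
-- `for x in range(p*p, limit+1, p)` marks multiples False.
def pvSieveLoop (limit p : Int) (arr : List Bool) : List Bool :=
  if p * p ≤ limit then
    pvSieveLoop limit (p + 1)
      (if PySem.List.pyGetD arr p false then
        (PySem.List.pyRange (p * p) (limit + 1) p).foldl
          (fun a x => PySem.List.pySetD a x false) arr
      else arr)
  else arr
termination_by (limit + 1 - p).toNat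
decreasing_by
  have hpp : p ≤ p * p := by nlinarith [mul_self_nonneg p, mul_self_nonneg (p - 1)]
  omega

-- is_prime = [True]*(limit+1); if limit >= 0: is_prime[0] = False; if limit >= 1: is_prime[1] = False
def pvInit (limit : Int) : List Bool :=
  let a0 := List.replicate (limit + 1).toNat true
  let a1 := if limit ≥ 0 then PySem.List.pySetD a0 0 false else a0
  if limit ≥ 1 then PySem.List.pySetD a1 1 false else a1

-- every index Python writes or reads (0, 1, p, x, i) is in range, so total pySetD/pyGetD are exact
def sieve_prefix (limit : Int) : List Int :=
  let is_prime := pvSieveLoop limit 2 (pvInit limit)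
  ((PySem.List.pyRange 0 (limit + 1) 1).foldl
    (fun (s : List Int × Int) i =>
      let cnt := if PySem.List.pyGetD is_prime i false then s.2 + 1 else s.2
      (PySem.List.pySetD s.1 i cnt, cnt))
    (List.replicate (limit + 1).toNat (0 : Int), 0)).1

-- ===== PORT B =====
-- B's `while d * d <= i` trial-division loop of _is_prime
def pvTrialLoop (i d : Int) : Bool :=
  if d * d ≤ i then
    if PySem.Int.mod i d == 0 then false else pvTrialLoop i (d + 1)
  else true
termination_by (i + 1 - d).toNat
decreasing_by
  have hdd : d ≤ d * d := by nlinarith [mul_self_nonneg d, mul_self_nonneg (d - 1)]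
  omega

def pvIsPrime (i : Int) : Bool := if i < 2 then false else pvTrialLoop i 2

def sieve_prefix_alt (limit : Int) : List Int :=
  ((PySem.List.pyRange 0 (limit + 1) 1).foldl
    (fun (s : List Int × Int) i =>
      let cnt := if pvIsPrime i then s.2 + 1 else s.2
      (s.1 ++ [cnt], cnt)) ([], 0)).1

-- ===== PRECONDITION & SPEC =====
def Spec_sieve_prefix (limit : Int) (out : List Int) : Prop := out = sieve_prefix_alt limit
instance (limit : Int) (out : List Int) : Decidable (Spec_sieve_prefix limit out) := by unfold Spec_sieve_prefix; infer_instance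

-- ===== CLAIM (what is proved, stated in full; the proofs are below) =====
def Claim_equal_sieve_prefix : Prop := ∀ (limit : Int), Dom_sieve_prefix limit → Spec_sieve_prefix limit (sieve_prefix limit)

-- ===== LEMMAS AND PROOFS =====

-- "no divisor d with 2 ≤ d < p divides k": the invariant of A's outer loop
def pvInv (p : Int) (k : Nat) : Prop :=
  2 ≤ (k : Int) ∧ ∀ d : Int, 2 ≤ d → d < p → d * d ≤ (k : Int) → ¬ d ∣ (k : Int)

-- trial primality as a proposition (what both final arrays compute)
def pvFinal (k : Nat) : Prop :=
  2 ≤ (k : Int) ∧ ∀ d : Int, 2 ≤ d → d * d ≤ (k : Int) → ¬ d ∣ (k : Int)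

-- the running scan both prefix loops compute: (list of counts, final count)
def pvScan (g : Int → Bool) : List Int → Int → List Int × Int
  | [], c => ([], c)
  | i :: is, c =>
      let c' := if g i then c + 1 else c
      let r := pvScan g is c'
      (c' :: r.1, r.2)

theorem pv_getD_set {α : Type} (l : List α) (i j : Nat) (a d : α) :
    (l.set i a).getD j d = if i = j ∧ j < l.length then a else l.getD j d := by
  simp only [List.getD_eq_getElem?_getD, List.getElem?_set]
  by_cases hij : i = j
  · subst hij
    by_cases h : i < l.length
    · simp [h]
    · rw [List.getElem?_eq_none (show l.length ≤ i by omega)]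
      simp [h]
  · simp [hij]

theorem pvMark_length (L : List Int) (arr : List Bool) :
    (L.foldl (fun a x => PySem.List.pySetD a x false) arr).length = arr.length := by
  induction L generalizing arr with
  | nil => rfl
  | cons x L ih => simp [List.foldl_cons, ih, PySem.List.length_pySetD]

theorem pvMark_getD (L : List Int) (arr : List Bool) (k : Nat) (hL : ∀ x ∈ L, 0 ≤ x) :
    (L.foldl (fun a x => PySem.List.pySetD a x false) arr).getD k false
      = (arr.getD k false && !decide ((k : Int) ∈ L)) := by
  induction L generalizing arr with
  | nil => simp
  | cons x L ih =>
    have hx : 0 ≤ x := hL x (by simp)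
    rw [List.foldl_cons, ih _ (fun y hy => hL y (by simp [hy])),
        PySem.List.pySetD_of_nonneg arr false hx, pv_getD_set]
    by_cases hxk : x.toNat = k
    · have hxk' : (k : Int) = x := by omega
      by_cases hk : k < arr.length
      · simp [hxk, hk, hxk']
      · rw [List.getD_eq_default arr false (show arr.length ≤ k by omega)]
        simp [hxk, hk, hxk']
    · have hxk' : (k : Int) ≠ x := by omega
      simp [hxk, hxk']

theorem pvTrialLoop_iff (i : Int) : ∀ d : Int, 2 ≤ d →
    (pvTrialLoop i d = true ↔ ∀ e : Int, d ≤ e → e * e ≤ i → ¬ e ∣ i) := by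
  intro d
  induction d using pvTrialLoop.induct i with
  | case1 d hle hmod =>
    intro _
    rw [pvTrialLoop, if_pos hle, if_pos hmod]
    have hdvd : d ∣ i := by
      rw [← PySem.Int.mod_eq_zero_iff_dvd]; simpa using hmod
    refine iff_of_false (by simp) ?_
    exact fun h => h d le_rfl hle hdvd
  | case2 d hle hmod ih =>
    intro h2
    rw [pvTrialLoop, if_pos hle, if_neg hmod, ih (by omega)]
    have hndvd : ¬ d ∣ i := by
      rw [← PySem.Int.mod_eq_zero_iff_dvd]; simpa using hmod
    constructor
    · intro h e hde hee
      rcases eq_or_lt_of_le hde with rfl | hlt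
      · exact hndvd
      · exact h e (by omega) hee
    · intro h e hde hee
      exact h e (by omega) hee
  | case3 d hle =>
    intro h2
    rw [pvTrialLoop, if_neg hle]
    simp only [true_iff]
    intro e hde hee hdvd
    have : d * d ≤ e * e := by nlinarith
    omega

theorem pvIsPrime_iff (k : Nat) : pvIsPrime (k : Int) = true ↔ pvFinal k := by
  unfold pvIsPrime pvFinal
  by_cases h2 : (k : Int) < 2
  · simp [h2]; omega
  · rw [if_neg h2, pvTrialLoop_iff _ 2 (by omega)]
    constructor
    · exact fun h => ⟨by omega, fun d hd => h d hd⟩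
    · exact fun h => h.2

theorem pvScan_cons (g : Int → Bool) (i : Int) (L : List Int) (c : Int) :
    pvScan g (i :: L) c = ((if g i then c + 1 else c) :: (pvScan g L (if g i then c + 1 else c)).1,
      (pvScan g L (if g i then c + 1 else c)).2) := rfl

theorem pvB_fold (g : Int → Bool) (L : List Int) (acc : List Int) (c : Int) :
    L.foldl (fun (s : List Int × Int) i =>
        let cnt := if g i then s.2 + 1 else s.2
        (s.1 ++ [cnt], cnt)) (acc, c)
      = (acc ++ (pvScan g L c).1, (pvScan g L c).2) := by
  induction L generalizing acc c with
  | nil => simp [pvScan]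
  | cons x L ih => simp [pvScan, List.foldl_cons, ih]

theorem pvA_fold (g : Int → Bool) : ∀ (m : Nat) (a : Int) (pre : List Int) (c : Int),
    0 ≤ a → pre.length = a.toNat →
    (PySem.List.pyRange a (a + m) 1).foldl (fun (s : List Int × Int) i =>
        let cnt := if g i then s.2 + 1 else s.2
        (PySem.List.pySetD s.1 i cnt, cnt)) (pre ++ List.replicate m 0, c)
      = (pre ++ (pvScan g (PySem.List.pyRange a (a + m) 1) c).1,
         (pvScan g (PySem.List.pyRange a (a + m) 1) c).2) := by
  intro m
  induction m with
  | zero =>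
    intro a pre c _ _
    simp [pvScan]
  | succ n ih =>
    intro a pre c ha hlen
    have hcons : PySem.List.pyRange a (a + (n+1:Nat)) 1
        = a :: PySem.List.pyRange (a+1) (a + (n+1:Nat)) 1 :=
      PySem.List.pyRange_one_cons (by omega)
    rw [hcons]
    simp only [List.foldl_cons, List.replicate_succ]
    set cnt := if g a then c + 1 else c with hcnt
    have hset : PySem.List.pySetD (pre ++ (0:Int) :: List.replicate n 0) a cnt
        = (pre ++ [cnt]) ++ List.replicate n 0 := by
      rw [PySem.List.pySetD_of_nonneg _ cnt ha, List.set_append]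
      simp [hlen]
    rw [hset]
    have := ih (a+1) (pre ++ [cnt]) cnt (by omega) (by simp [hlen]; omega)
    push_cast at this ⊢
    rw [show a + ((n:Int)+1) = a + 1 + (n:Int) by ring] at *
    rw [this]
    rw [pvScan_cons]
    simp [← hcnt, List.append_assoc]

theorem pvSieveLoop_length (limit p : Int) (arr : List Bool) :
    (pvSieveLoop limit p arr).length = arr.length := by
  induction p, arr using pvSieveLoop.induct limit with
  | case1 p arr h ih =>
    rw [pvSieveLoop, if_pos h]
    simp only [dite_eq_ite] at ih
    rw [ih]
    split
    · exact pvMark_length _ _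
    · rfl
  | case2 p arr h => rw [pvSieveLoop, if_neg h]

theorem pvSieveLoop_getD (limit : Int) : ∀ (p : Int) (arr : List Bool), 2 ≤ p →
    arr.length = (limit + 1).toNat →
    (∀ k, k < arr.length → (arr.getD k false = true ↔ pvInv p k)) →
    ∀ k, k < arr.length → ((pvSieveLoop limit p arr).getD k false = true ↔ pvFinal k) := by
  intro p arr
  induction p, arr using pvSieveLoop.induct limit with
  | case1 p arr h ih =>
    intro hp hlen hinv k hk
    have hple : p ≤ p * p := by nlinarith
    have hppnn : (0:Int) ≤ p * p := mul_self_nonneg p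
    have hplen : p.toNat < arr.length := by omega
    have hpcast : ((p.toNat : Int)) = p := by omega
    have hget : PySem.List.pyGetD arr p false = arr.getD p.toNat false := by
      rw [PySem.List.pyGetD_eq_getElem arr false (by omega) (by omega)]
      exact (List.getD_eq_getElem arr false hplen).symm
    rw [pvSieveLoop, if_pos h]
    by_cases hb : PySem.List.pyGetD arr p false = true
    · -- p is still unmarked: A crosses out its multiples from p*p
      rw [if_pos hb]
      rw [dif_pos hb] at ih
      set L := PySem.List.pyRange (p * p) (limit + 1) p with hLdef
      have hLnn : ∀ x ∈ L, 0 ≤ x := by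
        intro x hx
        have := (PySem.List.mem_pyRange_iff_of_pos (by omega : (0:Int) < p) x).1 hx
        omega
      have hmem : ∀ j : Nat, ((j : Int) ∈ L ↔ p * p ≤ (j:Int) ∧ (j:Int) < limit + 1 ∧ p ∣ (j:Int)) := by
        intro j
        rw [PySem.List.mem_pyRange_iff_of_pos (by omega : (0:Int) < p)]
        have hpp : p ∣ p * p := Dvd.intro p rfl
        constructor
        · rintro ⟨h1, h2, h3⟩
          exact ⟨h1, h2, by have := dvd_add h3 hpp; simpa using this⟩
        · rintro ⟨h1, h2, h3⟩
          exact ⟨h1, h2, dvd_sub h3 hpp⟩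
      have hmlen : (L.foldl (fun a x => PySem.List.pySetD a x false) arr).length = arr.length :=
        pvMark_length _ _
      refine ih (by omega) (by omega) ?_ k (by omega)
      intro j hj
      have hj' : j < arr.length := by omega
      have hjlim : (j : Int) ≤ limit := by omega
      rw [pvMark_getD _ _ _ hLnn]
      simp only [Bool.and_eq_true, Bool.not_eq_true', decide_eq_false_iff_not, hinv j hj']
      rw [hmem j]
      unfold pvInv
      constructor
      · rintro ⟨⟨h2, hd⟩, hnm⟩
        refine ⟨h2, fun d hd2 hdp1 hdd hdvd => ?_⟩
        rcases lt_or_eq_of_le (show d ≤ p by omega) with hdp | rfl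
        · exact hd d hd2 hdp hdd hdvd
        · exact hnm ⟨hdd, by omega, hdvd⟩
      · rintro ⟨h2, hd⟩
        refine ⟨⟨h2, fun d hd2 hdp hdd => hd d hd2 (by omega) hdd⟩, ?_⟩
        rintro ⟨h1, _, h3⟩
        exact hd p hp (by omega) h1 h3
    · -- p already marked composite: the pass does nothing
      rw [if_neg hb]
      rw [dif_neg hb] at ih
      have hnInvP : ¬ pvInv p p.toNat := by
        rw [← hinv p.toNat hplen, ← hget]
        simpa using hb
      have hwit : ∃ d : Int, 2 ≤ d ∧ d < p ∧ d * d ≤ p ∧ d ∣ p := by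
        unfold pvInv at hnInvP
        push Not at hnInvP
        obtain ⟨d, hd2, hdp, hdd, hdvd⟩ := hnInvP (by omega)
        rw [hpcast] at hdd hdvd
        exact ⟨d, hd2, hdp, hdd, hdvd⟩
      refine ih (by omega) hlen ?_ k hk
      intro j hj
      rw [hinv j hj]
      unfold pvInv
      have hjlim : (j : Int) ≤ limit := by omega
      constructor
      · rintro ⟨h2, hd⟩
        refine ⟨h2, fun d hd2 hdp1 hdd hdvd => ?_⟩
        rcases lt_or_eq_of_le (show d ≤ p by omega) with hdp | rfl
        · exact hd d hd2 hdp hdd hdvd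
        · obtain ⟨e, he2, hep, hee, hedvd⟩ := hwit
          exact hd e he2 hep (by nlinarith) (hedvd.trans hdvd)
      · rintro ⟨h2, hd⟩
        exact ⟨h2, fun d hd2 hdp hdd => hd d hd2 (by omega) hdd⟩
  | case2 p arr h =>
    intro hp hlen hinv k hk
    rw [pvSieveLoop, if_neg h]
    rw [hinv k hk]
    have hklim : (k : Int) ≤ limit := by omega
    unfold pvInv pvFinal
    constructor
    · rintro ⟨h2, hd⟩
      refine ⟨h2, fun d hd2 hdd => hd d hd2 ?_ hdd⟩
      by_contra hdp
      push Not at hdp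
      have : p * p ≤ d * d := by nlinarith
      omega
    · rintro ⟨h2, hd⟩
      exact ⟨h2, fun d hd2 _ hdd => hd d hd2 hdd⟩

theorem pvInit_length (limit : Int) : (pvInit limit).length = (limit + 1).toNat := by
  simp only [pvInit]
  split <;> split <;> simp [PySem.List.length_pySetD]

theorem pvInit_getD (limit : Int) (k : Nat) (hk : k < (limit + 1).toNat) :
    ((pvInit limit).getD k false = true ↔ pvInv 2 k) := by
  have hl0 : limit ≥ 0 := by omega
  have hInv2 : pvInv 2 k ↔ 2 ≤ (k : Int) := by
    unfold pvInv
    constructor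
    · exact fun h => h.1
    · exact fun h => ⟨h, fun d hd2 hd2' _ => by omega⟩
  rw [hInv2]
  simp only [pvInit]
  rw [if_pos hl0]
  by_cases hl1 : limit ≥ 1
  · rw [if_pos hl1, PySem.List.pySetD_of_nonneg _ false (by omega),
        PySem.List.pySetD_of_nonneg _ false (by omega), pv_getD_set, pv_getD_set]
    simp only [Int.toNat_one, Int.toNat_zero, List.length_set, List.length_replicate]
    rcases Nat.lt_or_ge k 2 with hk2 | hk2
    · rcases Nat.lt_or_ge k 1 with hk1 | hk1
      · rw [if_neg (by omega), if_pos (by omega)]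
        simp
        omega
      · rw [if_pos (by omega)]
        simp
        omega
    · rw [if_neg (by omega), if_neg (by omega),
          List.getD_eq_getElem _ _ (by simpa using hk)]
      simp only [List.getElem_replicate]
      simp
      omega
  · have hlim0 : limit = 0 := by omega
    have hk0 : k = 0 := by omega
    subst hk0
    rw [if_neg hl1, PySem.List.pySetD_of_nonneg _ false (by omega), pv_getD_set]
    simp [hlim0]

theorem sieve_getD_eq_isPrime (limit : Int) (i : Int)
    (h0 : 0 ≤ i) (h1 : i < limit + 1) :
    PySem.List.pyGetD (pvSieveLoop limit 2 (pvInit limit)) i false = pvIsPrime i := by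
  have hlen : (pvSieveLoop limit 2 (pvInit limit)).length = (limit + 1).toNat := by
    rw [pvSieveLoop_length, pvInit_length]
  have hki : i.toNat < (pvSieveLoop limit 2 (pvInit limit)).length := by omega
  have hcast : ((i.toNat : Int)) = i := by omega
  have hget : PySem.List.pyGetD (pvSieveLoop limit 2 (pvInit limit)) i false
      = (pvSieveLoop limit 2 (pvInit limit)).getD i.toNat false := by
    rw [PySem.List.pyGetD_eq_getElem _ false (by omega) (by omega)]
    exact (List.getD_eq_getElem _ false hki).symm
  rw [hget]
  have hlen0 : (pvInit limit).length = (limit + 1).toNat := pvInit_length limit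
  have hiff := pvSieveLoop_getD limit 2 (pvInit limit) (by omega) hlen0
    (fun k hk => pvInit_getD limit k (by omega)) i.toNat (by omega)
  rw [Bool.eq_iff_iff, hiff]
  conv_rhs => rw [← hcast]
  rw [pvIsPrime_iff]

-- ===== VERDICT (by name: the statement is the Claim_ definition above) =====
theorem sieve_prefix_spec : Claim_equal_sieve_prefix := by
  intro limit _
  unfold Spec_sieve_prefix
  simp only [sieve_prefix, sieve_prefix_alt]
  by_cases hneg : limit + 1 ≤ 0
  · rw [PySem.List.pyRange_one_eq_nil (by omega)]
    simp [show (limit + 1).toNat = 0 by omega]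
  · have hn : limit + 1 = (0 : Int) + ((limit + 1).toNat : Nat) := by omega
    set is_prime := pvSieveLoop limit 2 (pvInit limit) with hip
    have hcongr : (PySem.List.pyRange 0 (limit + 1) 1).foldl
        (fun (s : List Int × Int) i =>
          (PySem.List.pySetD s.1 i (if PySem.List.pyGetD is_prime i false then s.2 + 1 else s.2),
           if PySem.List.pyGetD is_prime i false then s.2 + 1 else s.2))
        (List.replicate (limit + 1).toNat (0 : Int), 0)
      = (PySem.List.pyRange 0 (limit + 1) 1).foldl
        (fun (s : List Int × Int) i =>
          (PySem.List.pySetD s.1 i (if pvIsPrime i then s.2 + 1 else s.2),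
           if pvIsPrime i then s.2 + 1 else s.2))
        (List.replicate (limit + 1).toNat (0 : Int), 0) := by
      apply PySem.List.foldl_congr_mem
      intro acc x hx
      have hmem := PySem.List.mem_pyRange_one.mp hx
      rw [sieve_getD_eq_isPrime limit x hmem.1 hmem.2]
    show ((PySem.List.pyRange 0 (limit + 1) 1).foldl
        (fun (s : List Int × Int) i =>
          (PySem.List.pySetD s.1 i (if PySem.List.pyGetD is_prime i false then s.2 + 1 else s.2),
           if PySem.List.pyGetD is_prime i false then s.2 + 1 else s.2))
        (List.replicate (limit + 1).toNat (0 : Int), 0)).1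
      = ((PySem.List.pyRange 0 (limit + 1) 1).foldl
        (fun (s : List Int × Int) i =>
          (s.1 ++ [if pvIsPrime i then s.2 + 1 else s.2], if pvIsPrime i then s.2 + 1 else s.2))
        ([], 0)).1
    rw [hcongr]
    have hrange : PySem.List.pyRange 0 (limit + 1) 1
        = PySem.List.pyRange 0 ((0 : Int) + ((limit + 1).toNat : Nat)) 1 := by rw [← hn]
    conv_lhs => rw [hrange]
    have hA := pvA_fold pvIsPrime (limit + 1).toNat 0 [] 0 le_rfl rfl
    simp only [List.nil_append] at hA
    rw [hA]
    have hB := pvB_fold pvIsPrime (PySem.List.pyRange 0 (limit + 1) 1) [] 0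
    rw [hB]
    rw [← hrange]
    simp
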